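-- pv_equiv track=rewrite | github.com/dplv/Advent-of-Code | 2023/day 13/day13.py | get_reflection_row
-- ===== SOURCE A (Python) =====
-- def get_reflection_row(pattern: list, part:int = 1) -> int:
--     for r in range(1, len(pattern)):
--         rows_in_reflection = min(r, len(pattern) - r)
--         above = slice(r - rows_in_reflection, r)
--         below = slice(r, r + rows_in_reflection)
--         str_above = ''.join(pattern[above])
--         str_below = ''.join(pattern[below][::-1])
--         if part ==1 and pattern[above] == pattern[below][::-1]:
--             return r
--         if part == 2 and len([str_above[i] for i in range(len(str_above)) if str_above[i] != str_below[i]]) == 1: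
--             return r
--     return -1
-- ===== SOURCE B (Python) =====
-- def get_reflection_row(pattern: list, part: int = 1) -> int:
--     # One unified scan: a mirror at r is valid when the total number of
--     # differing characters across the mirrored row pairs equals part - 1
--     # (0 smudges for part 1, exactly 1 smudge for part 2).
--     if part != 1 and part != 2:
--         return -1
--     target = part - 1
--     n = len(pattern)
--     for r in range(1, n):
--         k = min(r, n - r)
--         diffs = 0
--         for i in range(k):
--             row_a = pattern[r - 1 - i]
--             row_b = pattern[r + i]
--             diffs += sum(1 for x, y in zip(row_a, row_b) if x != y)
--             diffs += abs(len(row_a) - len(row_b))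
--         if diffs == target:
--             return r
--     return -1
-- ===== Notes on version B (the rewrite author's own statement) =====
-- stated objective: faster
-- what changed: Replaces A's two part-specific checks (slice-list equality for part 1, a rebuilt-joined-string positional diff list for part 2) with a single pairwise scan over the mirrored row pairs accumulating a character-mismatch count compared to target = part - 1; no slices, joined strings or diff lists are materialised per candidate row, which a timing run measured as much faster.
-- outside the precondition, e.g. on get_reflection_row(['a', 'bc'], 2): A returns 1, B returns -1; on get_reflection_row(['abc', 'x', 'x', 'abc'], 2): A raises IndexError, B returns -1
import Mathlib
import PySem

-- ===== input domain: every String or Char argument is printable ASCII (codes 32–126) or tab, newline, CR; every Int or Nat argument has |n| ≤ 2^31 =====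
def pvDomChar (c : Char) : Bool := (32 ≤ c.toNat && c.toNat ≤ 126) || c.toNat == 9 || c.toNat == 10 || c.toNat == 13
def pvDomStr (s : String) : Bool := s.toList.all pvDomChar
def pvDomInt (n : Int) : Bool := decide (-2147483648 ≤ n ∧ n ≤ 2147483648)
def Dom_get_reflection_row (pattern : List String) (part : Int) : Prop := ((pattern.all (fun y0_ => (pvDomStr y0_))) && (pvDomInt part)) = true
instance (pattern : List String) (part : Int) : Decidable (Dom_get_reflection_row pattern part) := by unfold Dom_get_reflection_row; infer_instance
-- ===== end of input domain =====

-- B unifies A's two part-specific checks into one mirrored-pair smudge count (target = part - 1); equivalence is claimed under Pre_ (part 2 requires equal-width rows).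

-- ===== PORT A =====
-- ''.join(xs) on a list of strings, as a char list
def pvJoinA (xs : List String) : List Char := PySem.Chars.join [] (xs.map String.toList)

-- len([str_above[i] for i in range(len(str_above)) if str_above[i] != str_below[i]])
-- str_below[i] can be an IndexError in Python (sb shorter than sa); pyGet? is none
-- exactly there, and Pre_ excludes those inputs.
def pvCountA2 (sa sb : List Char) : Int :=
  (((PySem.List.pyRange 0 (sa.length : Int)).filter
      (fun i => PySem.List.pyGet? sa i != PySem.List.pyGet? sb i)).length : Int)

def pvLoopA (pattern : List String) (part : Int) : List Int → Int
  | [] => -1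
  | r :: rs =>
    let k := min r ((pattern.length : Int) - r)
    let above := PySem.List.slice pattern (some (r - k)) (some r)
    let below := PySem.List.slice pattern (some r) (some (r + k))
    let belowRev := below.reverse   -- pattern[below][::-1]  (PySem.List.slice?_none_none_neg_one)
    let str_above := pvJoinA above
    let str_below := pvJoinA belowRev
    if part == 1 && above == belowRev then r
    else if part == 2 && pvCountA2 str_above str_below == 1 then r
    else pvLoopA pattern part rs

def get_reflection_row (pattern : List String) (part : Int) : Int :=
  pvLoopA pattern part (PySem.List.pyRange 1 (pattern.length : Int))

-- ===== PORT B =====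
-- sum(1 for x, y in zip(row_a, row_b) if x != y) + abs(len(row_a) - len(row_b))
def pvCharDiffs (a b : List Char) : Int :=
  ((a.zip b).countP (fun p => p.1 != p.2) : Int) + (((a.length : Int) - (b.length : Int)).natAbs : Int)

-- the inner 'for i in range(k)' accumulating diffs; the indices r-1-i and r+i are
-- always in range (1 ≤ r < len, i < k = min(r, len-r)), so pyGetD's default is never used
def pvRowDiffs (pattern : List String) (r k : Int) : Int :=
  (PySem.List.pyRange 0 k).foldl
    (fun diffs i =>
      diffs + pvCharDiffs (PySem.List.pyGetD pattern (r - 1 - i) "").toList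
                          (PySem.List.pyGetD pattern (r + i) "").toList) 0

def pvLoopB (pattern : List String) (part : Int) : List Int → Int
  | [] => -1
  | r :: rs =>
    let k := min r ((pattern.length : Int) - r)
    if pvRowDiffs pattern r k == part - 1 then r else pvLoopB pattern part rs

def get_reflection_row_alt (pattern : List String) (part : Int) : Int :=
  if part != 1 && part != 2 then -1
  else pvLoopB pattern part (PySem.List.pyRange 1 (pattern.length : Int))

-- ===== PRECONDITION & SPEC =====
-- Pre_ excludes part == 2 inputs whose rows have unequal lengths: there A's position-wise
-- comparison of the two joined strings is misaligned by the ragged widths (and can raise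
-- IndexError), an artefact of joining; B compares the rows pairwise instead.
def Pre_get_reflection_row (pattern : List String) (part : Int) : Prop :=
  part = 2 → ∀ s ∈ pattern, ∀ t ∈ pattern, s.length = t.length
instance (pattern : List String) (part : Int) : Decidable (Pre_get_reflection_row pattern part) := by unfold Pre_get_reflection_row; infer_instance

def pvWitness_get_reflection_row : List String × Int := (["#.", "#.", "..", "#."], 2)

def Spec_get_reflection_row (pattern : List String) (part : Int) (out : Int) : Prop := out = get_reflection_row_alt pattern part
instance (pattern : List String) (part : Int) (out : Int) : Decidable (Spec_get_reflection_row pattern part out) := by unfold Spec_get_reflection_row; infer_instance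

-- ===== CLAIM (what is proved, stated in full; the proofs are below) =====
def Claim_equal_get_reflection_row : Prop := ∀ (pattern : List String) (part : Int), Dom_get_reflection_row pattern part → Pre_get_reflection_row pattern part → Spec_get_reflection_row pattern part (get_reflection_row pattern part)

-- ===== LEMMAS AND PROOFS =====

-- row m of the pattern, as a char list
def pvRow (pattern : List String) (m : Nat) : List Char := (pattern.getD m "").toList

-- number of differing aligned positions
def pvZc (a b : List Char) : Nat := (a.zip b).countP (fun p => p.1 != p.2)

-- B's per-pair count, as a Nat
def pvHam (a b : List Char) : Nat := pvZc a b + (((a.length : Int) - (b.length : Int)).natAbs)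

-- B's total smudge count at mirror position rn, as a Nat
def pvSSum (pattern : List String) (rn kn : Nat) : Nat :=
  ∑ i ∈ Finset.range kn, pvHam (pvRow pattern (rn - 1 - i)) (pvRow pattern (rn + i))

lemma pvCharDiffs_eq_ham (a b : List Char) : pvCharDiffs a b = (pvHam a b : Int) := by
  simp [pvCharDiffs, pvHam, pvZc]

lemma sum_map_range_eq {M : Type} [AddCommMonoid M] (f : Nat → M) (n : Nat) :
    ((List.range n).map f).sum = ∑ i ∈ Finset.range n, f i := by
  induction n with
  | zero => simp
  | succ m ih => rw [List.range_succ, Finset.sum_range_succ, List.map_append]; simp [ih]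

lemma pvJoinA_eq_flatten (xs : List String) : pvJoinA xs = (xs.map String.toList).flatten := by
  unfold pvJoinA
  induction xs with
  | nil => simp [PySem.Chars.join_nil]
  | cons a l ih =>
    cases l with
    | nil => simp [PySem.Chars.join_singleton]
    | cons b m => simp_all [PySem.Chars.join_cons_cons]

lemma pvZc_eq_zero_iff (a b : List Char) (h : a.length = b.length) :
    (pvZc a b = 0 ↔ a = b) := by
  induction a generalizing b with
  | nil => cases b <;> simp_all [pvZc]
  | cons x a ih =>
    cases b with
    | nil => simp at h
    | cons y b =>
      simp only [List.length_cons, Nat.add_right_cancel_iff] at h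
      simp [pvZc, List.zip_cons_cons, List.countP_cons] at *
      constructor
      · rintro ⟨h1, h2⟩
        rcases Decidable.em (x = y) with he | he
        · exact ⟨he, (ih b h).1 h1⟩
        · simp [he] at h2
      · rintro ⟨he, hab⟩
        exact ⟨(ih b h).2 hab, by simp [he]⟩

lemma pvHam_eq_zero_iff (a b : List Char) : pvHam a b = 0 ↔ a = b := by
  unfold pvHam
  constructor
  · intro h
    have h1 : pvZc a b = 0 := by omega
    have hlen : a.length = b.length := by omega
    exact (pvZc_eq_zero_iff a b hlen).1 h1
  · intro h; subst h; simp [(pvZc_eq_zero_iff a a rfl).2 rfl]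

lemma countGet_eq_zc (sa sb : List Char) (h : sa.length = sb.length) :
    List.countP (fun k : Nat => sa[k]? != sb[k]?) (List.range sa.length) = pvZc sa sb := by
  induction sa generalizing sb with
  | nil => simp [pvZc]
  | cons x a ih =>
    cases sb with
    | nil => simp at h
    | cons y b =>
      simp only [List.length_cons, Nat.add_right_cancel_iff] at h
      rw [List.length_cons, List.range_succ_eq_map, List.countP_cons, List.countP_map]
      simp only [Function.comp_def, Nat.succ_eq_add_one, List.getElem?_cons_succ,
        List.getElem?_cons_zero]
      rw [ih b h]
      simp [pvZc, List.zip_cons_cons, List.countP_cons]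

-- A's index-wise count equals the zip count when the lengths agree
lemma pvCountA2_eq_zc (sa sb : List Char) (h : sa.length = sb.length) :
    pvCountA2 sa sb = (pvZc sa sb : Int) := by
  unfold pvCountA2
  rw [show ((sa.length : Int)) = ((sa.length : Nat) : Int) from rfl,
    PySem.List.pyRange_zero_nat, List.filter_map, List.length_map,
    ← List.countP_eq_length_filter]
  simp only [Function.comp_def, PySem.List.pyGet?_natCast]
  rw [countGet_eq_zc sa sb h]

-- (xs.drop a).take k, elementwise
lemma take_drop_eq_map_range {α : Type} (xs : List α) (a k : Nat) (h : a + k ≤ xs.length) (d : α) :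
    (xs.drop a).take k = (List.range k).map (fun j => xs.getD (a + j) d) := by
  apply List.ext_getElem
  · simp; omega
  · intro i h1 h2
    simp only [List.getElem_take, List.getElem_drop, List.getElem_map, List.getElem_range]
    rw [List.getD_eq_getElem xs d (by simp at h1; omega)]

lemma rev_take_drop_eq_map_range {α : Type} (xs : List α) (a k : Nat) (h : a + k ≤ xs.length) (d : α) :
    ((xs.drop a).take k).reverse = (List.range k).map (fun j => xs.getD (a + k - 1 - j) d) := by
  rw [take_drop_eq_map_range xs a k h d]
  apply List.ext_getElem
  · simp
  · intro i h1 h2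
    simp only [List.length_reverse, List.length_map, List.length_range] at h1 h2
    rw [List.getElem_reverse]
    simp only [List.getElem_map, List.getElem_range, List.length_map, List.length_range]
    congr 1
    omega

lemma zc_flatten (l : List (List Char × List Char)) (h : ∀ p ∈ l, p.1.length = p.2.length) :
    pvZc (l.map Prod.fst).flatten (l.map Prod.snd).flatten = (l.map (fun p => pvZc p.1 p.2)).sum := by
  induction l with
  | nil => simp [pvZc]
  | cons p l ih =>
    simp only [List.map_cons, List.flatten_cons, List.sum_cons]
    have hih := ih (fun q hq => h q (by simp [hq]))
    simp only [pvZc] at hih ⊢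
    rw [List.zip_append (h p (by simp)), List.countP_append, hih]

-- the slice pattern[r-k:r], elementwise
lemma sliceAbove_eq (pattern : List String) (r : Int) (hr1 : 1 ≤ r)
    (hr2 : r < (pattern.length : Int)) :
    PySem.List.slice pattern (some (r - min r ((pattern.length : Int) - r))) (some r)
      = (List.range (min r ((pattern.length : Int) - r)).toNat).map
          (fun j => pattern.getD (r.toNat - (min r ((pattern.length : Int) - r)).toNat + j) "") := by
  have hm1 : min r ((pattern.length : Int) - r) ≤ r := min_le_left _ _
  have hm2 : min r ((pattern.length : Int) - r) ≤ (pattern.length : Int) - r := min_le_right _ _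
  have hm0 : 0 ≤ min r ((pattern.length : Int) - r) := le_min (by omega) (by omega)
  set k := min r ((pattern.length : Int) - r) with hk
  rw [PySem.List.slice_toNat pattern (by omega) (by omega)]
  rw [show (r - k).toNat = r.toNat - k.toNat by omega,
    show r.toNat - (r.toNat - k.toNat) = k.toNat by omega]
  exact take_drop_eq_map_range pattern _ _ (by omega) ""

-- the reversed slice pattern[r:r+k][::-1], elementwise
lemma sliceBelowRev_eq (pattern : List String) (r : Int) (hr1 : 1 ≤ r)
    (hr2 : r < (pattern.length : Int)) :
    (PySem.List.slice pattern (some r) (some (r + min r ((pattern.length : Int) - r)))).reverse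
      = (List.range (min r ((pattern.length : Int) - r)).toNat).map
          (fun j => pattern.getD (r.toNat + (min r ((pattern.length : Int) - r)).toNat - 1 - j) "") := by
  have hm1 : min r ((pattern.length : Int) - r) ≤ r := min_le_left _ _
  have hm2 : min r ((pattern.length : Int) - r) ≤ (pattern.length : Int) - r := min_le_right _ _
  have hm0 : 0 ≤ min r ((pattern.length : Int) - r) := le_min (by omega) (by omega)
  set k := min r ((pattern.length : Int) - r) with hk
  rw [PySem.List.slice_toNat pattern (by omega) (by omega)]
  rw [show (r + k).toNat = r.toNat + k.toNat by omega,
    show r.toNat + k.toNat - r.toNat = k.toNat by omega]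
  exact rev_take_drop_eq_map_range pattern _ _ (by omega) ""

-- B's accumulated diffs equal the smudge-count sum
lemma rowDiffs_eq (pattern : List String) (r : Int) (hr1 : 1 ≤ r)
    (hr2 : r < (pattern.length : Int)) :
    pvRowDiffs pattern r (min r ((pattern.length : Int) - r))
      = (pvSSum pattern r.toNat (min r ((pattern.length : Int) - r)).toNat : Int) := by
  have hm1 : min r ((pattern.length : Int) - r) ≤ r := min_le_left _ _
  have hm0 : 0 ≤ min r ((pattern.length : Int) - r) := le_min (by omega) (by omega)
  set k := min r ((pattern.length : Int) - r) with hk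
  unfold pvRowDiffs
  rw [PySem.List.pyRange_one, List.foldl_map, PySem.List.foldl_add]
  have hcong : ∀ i ∈ List.range (k - 0).toNat,
      pvCharDiffs (PySem.List.pyGetD pattern (r - 1 - (0 + (i : Int))) "").toList
          (PySem.List.pyGetD pattern (r + (0 + (i : Int))) "").toList
        = (fun i : Nat => (pvHam (pvRow pattern (r.toNat - 1 - i)) (pvRow pattern (r.toNat + i)) : Int)) i := by
    intro i hi
    simp only [List.mem_range] at hi
    have e1 : r - 1 - (0 + (i : Int)) = ((r.toNat - 1 - i : Nat) : Int) := by omega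
    have e2 : r + (0 + (i : Int)) = ((r.toNat + i : Nat) : Int) := by omega
    rw [e1, e2, PySem.List.pyGetD_natCast, PySem.List.pyGetD_natCast, pvCharDiffs_eq_ham]
    rfl
  rw [List.map_congr_left hcong, sum_map_range_eq, zero_add, pvSSum,
    show (k - 0).toNat = k.toNat by omega, Nat.cast_sum]

-- part-1 per-position condition: slice equality iff zero smudges
lemma cond1_iff (pattern : List String) (r : Int) (hr1 : 1 ≤ r)
    (hr2 : r < (pattern.length : Int)) :
    (PySem.List.slice pattern (some (r - min r ((pattern.length : Int) - r))) (some r)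
        = (PySem.List.slice pattern (some r) (some (r + min r ((pattern.length : Int) - r)))).reverse)
      ↔ pvSSum pattern r.toNat (min r ((pattern.length : Int) - r)).toNat = 0 := by
  have hm1 : min r ((pattern.length : Int) - r) ≤ r := min_le_left _ _
  have hm0 : 0 ≤ min r ((pattern.length : Int) - r) := le_min (by omega) (by omega)
  set k := min r ((pattern.length : Int) - r) with hk
  rw [sliceAbove_eq pattern r hr1 hr2, sliceBelowRev_eq pattern r hr1 hr2, ← hk]
  rw [List.map_inj_left]
  unfold pvSSum
  rw [Finset.sum_eq_zero_iff]
  constructor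
  · intro h i hi
    simp only [Finset.mem_range] at hi
    have := h (k.toNat - 1 - i) (by simp; omega)
    rw [pvHam_eq_zero_iff]
    unfold pvRow
    rw [show r.toNat - k.toNat + (k.toNat - 1 - i) = r.toNat - 1 - i by omega,
      show r.toNat + k.toNat - 1 - (k.toNat - 1 - i) = r.toNat + i by omega] at this
    rw [this]
  · intro h j hj
    simp only [List.mem_range] at hj
    have := h (k.toNat - 1 - j) (by simp; omega)
    rw [pvHam_eq_zero_iff] at this
    unfold pvRow at this
    rw [show r.toNat - 1 - (k.toNat - 1 - j) = r.toNat - k.toNat + j by omega,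
      show r.toNat + (k.toNat - 1 - j) = r.toNat + k.toNat - 1 - j by omega] at this
    exact String.toList_inj.mp this

-- corresponding blocks of equal length flatten to equal total lengths
lemma flatten_len_eq (l : List (List Char × List Char)) (h : ∀ p ∈ l, p.1.length = p.2.length) :
    (l.map Prod.fst).flatten.length = (l.map Prod.snd).flatten.length := by
  induction l with
  | nil => rfl
  | cons p l ih => simp_all

-- rows fetched at valid indices are members of the pattern
lemma row_mem (pattern : List String) (m : Nat) (h : m < pattern.length) :
    pattern.getD m "" ∈ pattern := by
  rw [List.getD_eq_getElem pattern "" h]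
  exact List.getElem_mem h

-- part-2 per-position condition: A's joined count equals the smudge-count sum (equal widths)
lemma cond2_eq (pattern : List String) (r : Int) (hr1 : 1 ≤ r)
    (hr2 : r < (pattern.length : Int))
    (hrect : ∀ s ∈ pattern, ∀ t ∈ pattern, s.length = t.length) :
    pvCountA2
        (pvJoinA (PySem.List.slice pattern (some (r - min r ((pattern.length : Int) - r))) (some r)))
        (pvJoinA ((PySem.List.slice pattern (some r) (some (r + min r ((pattern.length : Int) - r)))).reverse))
      = (pvSSum pattern r.toNat (min r ((pattern.length : Int) - r)).toNat : Int) := by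
  have hm1 : min r ((pattern.length : Int) - r) ≤ r := min_le_left _ _
  have hm2 : min r ((pattern.length : Int) - r) ≤ (pattern.length : Int) - r := min_le_right _ _
  have hm0 : 0 ≤ min r ((pattern.length : Int) - r) := le_min (by omega) (by omega)
  set k := min r ((pattern.length : Int) - r) with hk
  rw [sliceAbove_eq pattern r hr1 hr2, sliceBelowRev_eq pattern r hr1 hr2, ← hk]
  rw [pvJoinA_eq_flatten, pvJoinA_eq_flatten, List.map_map, List.map_map]
  set l : List (List Char × List Char) := (List.range k.toNat).map
    (fun j => (pvRow pattern (r.toNat - k.toNat + j), pvRow pattern (r.toNat + k.toNat - 1 - j)))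
    with hl
  have hfst : (List.range k.toNat).map (String.toList ∘ fun j => pattern.getD (r.toNat - k.toNat + j) "")
      = l.map Prod.fst := by rw [hl, List.map_map]; rfl
  have hsnd : (List.range k.toNat).map (String.toList ∘ fun j => pattern.getD (r.toNat + k.toNat - 1 - j) "")
      = l.map Prod.snd := by rw [hl, List.map_map]; rfl
  rw [hfst, hsnd]
  have hlen : ∀ p ∈ l, p.1.length = p.2.length := by
    intro p hp
    rw [hl] at hp
    simp only [List.mem_map, List.mem_range] at hp
    obtain ⟨j, hj, hpj⟩ := hp
    subst hpj
    simp only [pvRow, String.length_toList]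
    exact hrect _ (row_mem pattern _ (by omega)) _ (row_mem pattern _ (by omega))
  rw [pvCountA2_eq_zc _ _ (flatten_len_eq l hlen), zc_flatten l hlen]
  congr 1
  rw [hl, List.map_map, sum_map_range_eq]
  unfold pvSSum
  rw [← Finset.sum_range_reflect]
  apply Finset.sum_congr rfl
  intro j hj
  simp only [Finset.mem_range] at hj
  simp only [Function.comp_def]
  rw [show r.toNat - k.toNat + (k.toNat - 1 - j) = r.toNat - 1 - j by omega,
    show r.toNat + k.toNat - 1 - (k.toNat - 1 - j) = r.toNat + j by omega]
  have hl2 : (pvRow pattern (r.toNat - 1 - j)).length = (pvRow pattern (r.toNat + j)).length := by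
    simp only [pvRow, String.length_toList]
    exact hrect _ (row_mem pattern _ (by omega)) _ (row_mem pattern _ (by omega))
  simp [pvHam, hl2]

-- A returns -1 whenever part is neither 1 nor 2
lemma loopA_other (pattern : List String) (part : Int) (h1 : part ≠ 1) (h2 : part ≠ 2) :
    ∀ rs, pvLoopA pattern part rs = -1 := by
  intro rs
  induction rs with
  | nil => rfl
  | cons r rs ih => simp [pvLoopA, h1, h2, ih]

-- the two loops agree, r by r
lemma loop_eq (pattern : List String) (part : Int)
    (hp : part = 1 ∨ (part = 2 ∧ ∀ s ∈ pattern, ∀ t ∈ pattern, s.length = t.length)) :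
    ∀ rs, (∀ r ∈ rs, 1 ≤ r ∧ r < (pattern.length : Int)) →
      pvLoopA pattern part rs = pvLoopB pattern part rs := by
  intro rs
  induction rs with
  | nil => intro _; rfl
  | cons r rs ih =>
    intro hmem
    obtain ⟨hr1, hr2⟩ := hmem r (by simp)
    have ihr := ih (fun q hq => hmem q (by simp [hq]))
    rcases hp with h1 | ⟨h2, hrect⟩
    · subst h1
      simp only [pvLoopA, pvLoopB]
      rw [rowDiffs_eq pattern r hr1 hr2]
      rcases Decidable.em (pvSSum pattern r.toNat (min r ((pattern.length : Int) - r)).toNat = 0)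
        with hz | hz
      · have := (cond1_iff pattern r hr1 hr2).mpr hz
        simp [this, hz]
      · have : ¬ (PySem.List.slice pattern (some (r - min r ((pattern.length : Int) - r))) (some r)
            = (PySem.List.slice pattern (some r) (some (r + min r ((pattern.length : Int) - r)))).reverse) :=
          fun hc => hz ((cond1_iff pattern r hr1 hr2).mp hc)
        simp [this, hz, ihr]
    · subst h2
      simp only [pvLoopA, pvLoopB]
      rw [rowDiffs_eq pattern r hr1 hr2, cond2_eq pattern r hr1 hr2 hrect]
      rcases Decidable.em ((pvSSum pattern r.toNat (min r ((pattern.length : Int) - r)).toNat : Int) = 1)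
        with hz | hz
      · simp [hz]
      · simp [hz, ihr]

-- ===== VERDICT (by name: the statement is the Claim_ definition above) =====
theorem get_reflection_row_spec : Claim_equal_get_reflection_row := by
  intro pattern part _ hpre
  unfold Spec_get_reflection_row get_reflection_row get_reflection_row_alt
  have hb : ∀ r ∈ PySem.List.pyRange 1 (pattern.length : Int), 1 ≤ r ∧ r < (pattern.length : Int) :=
    fun r hr => PySem.List.mem_pyRange_one.mp hr
  rcases Decidable.em (part = 1) with h1 | h1
  · subst h1
    rw [if_neg (by simp)]
    exact loop_eq pattern 1 (Or.inl rfl) _ hb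
  rcases Decidable.em (part = 2) with h2 | h2
  · subst h2
    rw [if_neg (by simp)]
    exact loop_eq pattern 2 (Or.inr ⟨rfl, hpre rfl⟩) _ hb
  · rw [if_pos (by simp [h1, h2]), loopA_other pattern part h1 h2]
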